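-- pv_equiv track=rewrite | github.com/cr625/proethica | app/utils/label_normalization.py | get_concept_type_from_label
-- ===== SOURCE A (Python) =====
-- CONCEPT_TYPES = {
--     "role", "principle", "obligation", "state", "resource",
--     "action", "event", "capability", "constraint"
-- }
--
-- def get_concept_type_from_label(label: str) -> str:
--     """Extract the concept type from a label if present.
--
--     Returns:
--         The concept type (lowercase) or empty string if not found
--     """
--     if not label:
--         return ""
--
--     label_lower = label.lower().strip()
--     for concept_type in CONCEPT_TYPES:
--         if label_lower.endswith(f" {concept_type}"):
--             return concept_type
--         elif label_lower.endswith(concept_type) and len(label_lower) == len(concept_type):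
--             return concept_type
--
--     return ""
-- ===== SOURCE B (Python) =====
-- CONCEPT_TYPES = {
--     "role", "principle", "obligation", "state", "resource",
--     "action", "event", "capability", "constraint"
-- }
--
-- def get_concept_type_from_label(label: str) -> str:
--     """Extract the concept type from a label if present (single scan + one set lookup)."""
--     if not label:
--         return ""
--     s = label.lower().strip()
--     candidate = s[s.rfind(' ') + 1:]
--     return candidate if candidate in CONCEPT_TYPES else ""
-- ===== Notes on version B (the rewrite author's own statement) =====
-- stated objective: simpler
-- what changed: Instead of looping over the nine concept types testing two suffix conditions each, B extracts the last space-delimited token once via str.rfind plus a slice and does a single set membership lookup.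
import Mathlib
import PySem

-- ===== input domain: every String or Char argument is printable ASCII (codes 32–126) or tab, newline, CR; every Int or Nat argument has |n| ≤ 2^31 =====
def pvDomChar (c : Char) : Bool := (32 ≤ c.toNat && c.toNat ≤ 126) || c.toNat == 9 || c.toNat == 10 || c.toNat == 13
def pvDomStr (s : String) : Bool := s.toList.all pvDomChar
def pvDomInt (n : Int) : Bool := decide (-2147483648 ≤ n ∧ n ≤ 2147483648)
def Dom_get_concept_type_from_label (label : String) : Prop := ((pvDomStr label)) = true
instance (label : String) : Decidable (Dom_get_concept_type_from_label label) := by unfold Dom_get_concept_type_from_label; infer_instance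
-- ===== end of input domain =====

-- B replaces A's nine-way suffix-testing loop by one rfind-based extraction of the
-- last space-delimited token plus a single set lookup (objective: simpler).

-- ===== PORT A =====
-- CONCEPT_TYPES (a Python set literal; the result is order-independent, ported in source order)
def pvConceptTypes : List String :=
  ["role", "principle", "obligation", "state", "resource",
   "action", "event", "capability", "constraint"]

-- the 'for concept_type in CONCEPT_TYPES' loop of A
def pvLoopA (s : String) : List String → String
  | [] => ""
  | t :: rest =>
    if PySem.Str.endswith s (" " ++ t) then t
    else if PySem.Str.endswith s t && (PySem.Str.len s == PySem.Str.len t) then t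
    else pvLoopA s rest

def get_concept_type_from_label (label : String) : String :=
  if label = "" then ""
  else
    let label_lower := PySem.Str.strip (PySem.Str.lower label)
    pvLoopA label_lower pvConceptTypes

-- ===== PORT B =====
def get_concept_type_from_label_alt (label : String) : String :=
  if label = "" then ""
  else
    let s := PySem.Str.strip (PySem.Str.lower label)
    let candidate := PySem.Str.slice s (some (PySem.Str.rfind s " " + 1)) none
    if candidate ∈ pvConceptTypes then candidate else ""

-- ===== PRECONDITION & SPEC =====
def Spec_get_concept_type_from_label (label : String) (out : String) : Prop := out = get_concept_type_from_label_alt label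
instance (label : String) (out : String) : Decidable (Spec_get_concept_type_from_label label out) := by unfold Spec_get_concept_type_from_label; infer_instance

-- ===== CLAIM (what is proved, stated in full; the proofs are below) =====
def Claim_equal_get_concept_type_from_label : Prop := ∀ (label : String), Dom_get_concept_type_from_label label → Spec_get_concept_type_from_label label (get_concept_type_from_label label)

-- ===== LEMMAS AND PROOFS =====

-- the List-Char value of B's candidate: everything after the last space
def pvCand (l : List Char) : List Char := l.drop (PySem.Chars.rfind l [' '] + 1).toNat

theorem pv_singleton_isPrefixOf (x : Char) (m : List Char) :
    [x].isPrefixOf m = true ↔ m.head? = some x := by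
  rw [List.isPrefixOf_iff_prefix]
  cases m with
  | nil => simp
  | cons a m =>
    simp only [List.head?_cons, Option.some_inj]
    constructor
    · rintro ⟨t, ht⟩
      injection ht with h1 _
      exact h1.symm
    · intro h
      subst h
      exact ⟨m, rfl⟩

theorem pv_go_spec (l : List Char) (j : Nat) :
    (PySem.Chars.rfind.go l [' '] j = -1 ∧ ∀ i ≤ j, l[i]? ≠ some ' ') ∨
    (∃ i ≤ j, PySem.Chars.rfind.go l [' '] j = (i : Int) ∧ l[i]? = some ' ' ∧
      ∀ k, i < k → k ≤ j → l[k]? ≠ some ' ') := by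
  induction j with
  | zero =>
    rw [PySem.Chars.rfind.go]
    by_cases h : [' '].isPrefixOf l = true
    · refine Or.inr ⟨0, le_refl _, by simp [h], ?_, by omega⟩
      have := (pv_singleton_isPrefixOf ' ' l).mp h
      rwa [List.head?_eq_getElem?] at this
    · refine Or.inl ⟨by simp [h], ?_⟩
      intro i hi
      interval_cases i
      intro hc
      exact h ((pv_singleton_isPrefixOf ' ' l).mpr (by rw [List.head?_eq_getElem?]; exact hc))
  | succ j ih =>
    rw [PySem.Chars.rfind.go]
    by_cases h : [' '].isPrefixOf (List.drop (j + 1) l) = true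
    · refine Or.inr ⟨j + 1, le_refl _, by simp [h], ?_, by omega⟩
      have := (pv_singleton_isPrefixOf ' ' _).mp h
      rwa [List.head?_drop] at this
    · have hnd : l[j + 1]? ≠ some ' ' := by
        intro hc
        exact h ((pv_singleton_isPrefixOf ' ' _).mpr (by rwa [List.head?_drop]))
      rcases ih with ⟨h1, h2⟩ | ⟨i, hij, heq, hsp, hmax⟩
      · refine Or.inl ⟨by simp [h, h1], ?_⟩
        intro i hi
        rcases Nat.lt_succ_iff_lt_or_eq.mp (Nat.lt_succ_of_le hi) with h' | h'
        · exact h2 i (by omega)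
        · subst h'; exact hnd
      · refine Or.inr ⟨i, by omega, by simp [h, heq], hsp, ?_⟩
        intro k hik hk
        rcases Nat.lt_succ_iff_lt_or_eq.mp (Nat.lt_succ_of_le hk) with h' | h'
        · exact hmax k hik (by omega)
        · subst h'; exact hnd

theorem pv_cand_spec (l : List Char) :
    (pvCand l = l ∧ ' ' ∉ l) ∨ (' ' :: pvCand l <:+ l ∧ ' ' ∉ pvCand l) := by
  unfold pvCand PySem.Chars.rfind
  rcases pv_go_spec l l.length with ⟨h1, h2⟩ | ⟨i, _, heq, hsp, hmax⟩
  · refine Or.inl ⟨by simp [h1], ?_⟩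
    intro hm
    obtain ⟨i, hi, hgi⟩ := List.getElem_of_mem hm
    exact h2 i (le_of_lt hi) (by simp [List.getElem?_eq_getElem hi, hgi])
  · have hilt : i < l.length := (List.getElem?_eq_some_iff.mp hsp).1
    have hgi : l[i] = ' ' := by
      have := List.getElem?_eq_getElem hilt
      rw [hsp] at this; exact (Option.some_inj.mp this).symm
    have htn : (PySem.Chars.rfind.go l [' '] l.length + 1).toNat = i + 1 := by
      rw [heq]; omega
    rw [htn]
    refine Or.inr ⟨?_, ?_⟩
    · have hd := List.drop_eq_getElem_cons hilt
      rw [hgi] at hd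
      rw [← hd]
      exact List.drop_suffix i l
    · intro hm
      obtain ⟨p, hp, hgp⟩ := List.getElem_of_mem hm
      have : l[i + 1 + p]? = some ' ' := by
        rw [← List.getElem?_drop]
        simp [List.getElem?_eq_getElem hp, hgp]
      have hlen : i + 1 + p < l.length := (List.getElem?_eq_some_iff.mp this).1
      exact hmax (i + 1 + p) (by omega) (by omega) this

theorem pv_cand_unique (l tl : List Char) (ht : ' ' ∉ tl) :
    ((' ' :: tl <:+ l) ∨ l = tl) ↔ tl = pvCand l := by
  constructor
  · intro h
    rcases pv_cand_spec l with ⟨hc, hns⟩ | ⟨hsuf, hnc⟩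
    · rcases h with h | h
      · exact absurd (h.mem (by simp)) hns
      · rw [hc, h]
    · rcases h with h | h
      · rcases List.suffix_or_suffix_of_suffix h hsuf with h' | h'
        · rcases List.suffix_cons_iff.mp h' with h'' | h''
          · injection h'' with _ h2
          · exact absurd (h''.mem (by simp)) hnc
        · rcases List.suffix_cons_iff.mp h' with h'' | h''
          · injection h'' with _ h2; exact h2.symm
          · exact absurd (h''.mem (by simp)) ht
      · subst h
        exact absurd (hsuf.mem (by simp)) ht
  · intro h
    subst h
    rcases pv_cand_spec l with ⟨hc, _⟩ | ⟨hsuf, _⟩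
    · exact Or.inr hc.symm
    · exact Or.inl hsuf

theorem pv_candS_toList (s : String) :
    (PySem.Str.slice s (some (PySem.Str.rfind s " " + 1)) none).toList = pvCand s.toList := by
  have hr : PySem.Str.rfind s " " = PySem.Chars.rfind s.toList [' '] := by
    rw [PySem.Str.rfind_eq]; rfl
  have hge : -1 ≤ PySem.Chars.rfind s.toList [' '] := by
    unfold PySem.Chars.rfind
    rcases pv_go_spec s.toList s.toList.length with ⟨h1, _⟩ | ⟨i, _, heq, _, _⟩
    · rw [h1]
    · rw [heq]; omega
  rw [PySem.Str.toList_slice, PySem.Chars.slice_eq_listSlice, hr,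
    PySem.List.slice_from _ (by omega)]
  rfl

theorem pv_branch_iff (s t : String) (ht : ' ' ∉ t.toList) :
    (PySem.Str.endswith s (" " ++ t) = true ∨
      (PySem.Str.endswith s t = true ∧ PySem.Str.len s = PySem.Str.len t)) ↔
    t.toList = pvCand s.toList := by
  rw [← pv_cand_unique s.toList t.toList ht]
  constructor
  · rintro (h | ⟨h1, h2⟩)
    · left
      rw [PySem.Str.endswith_eq, PySem.Chars.endswith_iff, String.toList_append] at h
      simpa using h
    · right
      rw [PySem.Str.endswith_eq, PySem.Chars.endswith_iff] at h1
      rw [PySem.Str.len_eq, PySem.Str.len_eq, Nat.cast_inj] at h2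
      exact (h1.eq_of_length h2.symm).symm
  · rintro (h | h)
    · left
      rw [PySem.Str.endswith_eq, PySem.Chars.endswith_iff, String.toList_append]
      simpa using h
    · right
      constructor
      · rw [PySem.Str.endswith_eq, PySem.Chars.endswith_iff, h]
      · rw [PySem.Str.len_eq, PySem.Str.len_eq, h]

theorem pv_loopA_eq (s : String) (L : List String) (h : ∀ t ∈ L, ' ' ∉ t.toList) :
    pvLoopA s L =
      (if PySem.Str.slice s (some (PySem.Str.rfind s " " + 1)) none ∈ L
       then PySem.Str.slice s (some (PySem.Str.rfind s " " + 1)) none else "") := by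
  induction L with
  | nil => simp [pvLoopA]
  | cons t rest ih =>
    have ht : ' ' ∉ t.toList := h t (by simp)
    have hrest : ∀ u ∈ rest, ' ' ∉ u.toList := fun u hu => h u (by simp [hu])
    set c := PySem.Str.slice s (some (PySem.Str.rfind s " " + 1)) none with hc
    rw [pvLoopA]
    by_cases hcond : t.toList = pvCand s.toList
    · have hct : c = t := by
        rw [← String.toList_inj, hc, pv_candS_toList, hcond]
      have hmem : c ∈ t :: rest := by simp [hct]
      rw [if_pos hmem]
      rcases (pv_branch_iff s t ht).mpr hcond with h1 | ⟨h1, h2⟩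
      · rw [if_pos h1, hct]
      · by_cases hb : PySem.Str.endswith s (" " ++ t) = true
        · rw [if_pos hb, hct]
        · rw [if_neg hb, if_pos (show (PySem.Str.endswith s t && (PySem.Str.len s == PySem.Str.len t)) = true by rw [h1, h2]; simp), hct]
    · have hct : c ≠ t := by
        intro hcontra
        apply hcond
        rw [← hcontra, hc, ← pv_candS_toList]
      have h1 : ¬ PySem.Str.endswith s (" " ++ t) = true := by
        intro hb; exact hcond ((pv_branch_iff s t ht).mp (Or.inl hb))
      have h2 : ¬ (PySem.Str.endswith s t && (PySem.Str.len s == PySem.Str.len t)) = true := by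
        intro hb
        simp only [Bool.and_eq_true, beq_iff_eq] at hb
        exact hcond ((pv_branch_iff s t ht).mp (Or.inr hb))
      rw [if_neg h1, if_neg h2, ih hrest]
      simp [List.mem_cons, hct]

-- ===== VERDICT (by name: the statement is the Claim_ definition above) =====
theorem get_concept_type_from_label_spec : Claim_equal_get_concept_type_from_label := by
  intro label _
  unfold Spec_get_concept_type_from_label get_concept_type_from_label get_concept_type_from_label_alt
  by_cases h : label = ""
  · simp [h]
  · simp only [h, if_false]
    exact pv_loopA_eq _ pvConceptTypes (by decide)
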